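-- pv_equiv track=rewrite | github.com/ZubaidaMeem/PythonMastering | Day_08/String_Builder.py | add_char
-- ===== SOURCE A (Python) =====
-- def add_char(old_string, char):
--     old_size = len(old_string)
--     new_size = old_size + 1
--     new_memory = [''] * new_size
--     for i in range(old_size):
--         new_memory[i] = old_string[i]
--     new_memory[old_size] = char
--     return "".join(new_memory)
-- ===== SOURCE B (Python) =====
-- def add_char(old_string, char):
--     return old_string + char
-- ===== Notes on version B (the rewrite author's own statement) =====
-- stated objective: idiomatic
-- what changed: Replaces the allocate-buffer / character-copy loop / join procedure with the single closed-form concatenation old_string + char.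
import Mathlib
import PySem

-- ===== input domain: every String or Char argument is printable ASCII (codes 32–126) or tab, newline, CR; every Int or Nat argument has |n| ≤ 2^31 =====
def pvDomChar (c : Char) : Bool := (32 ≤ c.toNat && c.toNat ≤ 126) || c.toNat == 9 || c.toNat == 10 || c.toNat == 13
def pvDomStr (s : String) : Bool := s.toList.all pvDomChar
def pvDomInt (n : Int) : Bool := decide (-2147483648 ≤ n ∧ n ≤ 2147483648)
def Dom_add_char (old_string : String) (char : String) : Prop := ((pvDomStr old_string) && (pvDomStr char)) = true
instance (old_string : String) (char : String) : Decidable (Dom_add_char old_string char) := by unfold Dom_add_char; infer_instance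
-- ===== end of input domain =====

-- B replaces A's buffer-allocate / per-character copy loop / join procedure by the single concatenation old_string + char (idiomatic).

-- ===== PORT A =====
def add_char (old_string : String) (char : String) : String :=
  let old_size : Int := PySem.Str.len old_string
  let new_size : Int := old_size + 1
  let new_memory : List String := List.replicate new_size.toNat ""   -- [''] * new_size
  -- for i in range(old_size): new_memory[i] = old_string[i]  (i always in range, so the total forms pySetD/pyGetD are exact here)
  let new_memory := (PySem.List.pyRange 0 old_size 1).foldl
    (fun m i => PySem.List.pySetD m i (String.ofList [PySem.List.pyGetD old_string.toList i ' '])) new_memory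
  let new_memory := PySem.List.pySetD new_memory old_size char
  PySem.Str.join "" new_memory

-- ===== PORT B =====
-- 'old_string + char': Python string concatenation, exact as append of the character lists.
def add_char_alt (old_string : String) (char : String) : String :=
  String.ofList (old_string.toList ++ char.toList)

-- ===== PRECONDITION & SPEC =====
def Spec_add_char (old_string : String) (char : String) (out : String) : Prop := out = add_char_alt old_string char
instance (old_string : String) (char : String) (out : String) : Decidable (Spec_add_char old_string char out) := by unfold Spec_add_char; infer_instance

-- ===== CLAIM (what is proved, stated in full; the proofs are below) =====
def Claim_equal_add_char : Prop := ∀ (old_string : String) (char : String), Dom_add_char old_string char → Spec_add_char old_string char (add_char old_string char)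

-- ===== LEMMAS AND PROOFS =====

-- The copy loop turns the blank slots of the buffer into the singleton strings of the source characters.
theorem fill_loop (cs done : List Char) (tail : List String) :
    (PySem.List.pyRange done.length (done.length + cs.length) 1).foldl
      (fun m i => PySem.List.pySetD m i (String.ofList [PySem.List.pyGetD (done ++ cs) i ' ']))
      (done.map (fun c => String.ofList [c]) ++ (List.replicate cs.length "" ++ tail))
    = (done ++ cs).map (fun c => String.ofList [c]) ++ tail := by
  induction cs generalizing done with
  | nil => simp
  | cons c cs ih =>
    have hlt : (done.length : Int) < done.length + (c :: cs).length := by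
      simp
    rw [PySem.List.pyRange_one_cons hlt]
    simp only [List.foldl_cons]
    have hget : PySem.List.pyGetD (done ++ c :: cs) (done.length : Int) ' ' = c := by
      simp [PySem.List.pyGetD_natCast, List.getD]
    have hset : PySem.List.pySetD
        (done.map (fun c => String.ofList [c]) ++ (List.replicate (c :: cs).length "" ++ tail))
        (done.length : Int) (String.ofList [c])
        = (done ++ [c]).map (fun c => String.ofList [c]) ++ (List.replicate cs.length "" ++ tail) := by
      rw [PySem.List.pySetD_natCast, List.set_append]
      simp [List.replicate_succ]
    rw [hget, hset]
    have := ih (done ++ [c])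
    simp only [List.length_append, List.length_cons, List.append_assoc,
      List.singleton_append] at this ⊢
    convert this using 3 <;> simp <;> ring

-- ''.join is plain flattening.
theorem join_nil_flatten (parts : List (List Char)) :
    PySem.Chars.join [] parts = parts.flatten := by
  induction parts with
  | nil => simp [PySem.Chars.join_nil]
  | cons a rest ih =>
    cases rest with
    | nil => simp [PySem.Chars.join_singleton]
    | cons b r => simp [PySem.Chars.join_cons_cons] at *; simp [ih]

theorem add_char_eq_alt (o c : String) : add_char o c = add_char_alt o c := by
  apply String.toList_inj.mp
  unfold add_char add_char_alt
  simp only [PySem.Str.len_eq]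
  have hrep : List.replicate ((o.toList.length : Int) + 1).toNat ("" : String)
      = List.replicate o.toList.length "" ++ List.replicate 1 "" := by
    have h : ((o.toList.length : Int) + 1).toNat = o.toList.length + 1 := by omega
    rw [h, ← List.replicate_add]
  rw [hrep]
  have := fill_loop o.toList [] [""]
  simp only [List.length_nil, Nat.cast_zero, List.map_nil, List.nil_append, zero_add] at this
  rw [show (List.replicate 1 ("":String)) = [""] from rfl, this]
  rw [PySem.List.pySetD_natCast, List.set_append]
  have hs : ∀ l : List Char, (l.map (fun x => [x])).flatten = l := by
    intro l; induction l with
    | nil => simp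
    | cons x xs ih => simp [ih]
  simp [join_nil_flatten, Function.comp_def, hs]

-- ===== VERDICT (by name: the statement is the Claim_ definition above) =====
theorem add_char_spec : Claim_equal_add_char := by
  intro o c _
  unfold Spec_add_char
  exact add_char_eq_alt o c
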